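-- pv_equiv track=rewrite | github.com/iagolarrondo/investigai-text-to-graph | src/session/memory.py | infer_active_referents
-- ===== SOURCE A (Python) =====
-- def _node_type_prefix(node_id: str) -> str:
--     s = (node_id or "").strip()
--     if not s:
--         return ""
--     low = s.lower()
--     if low.startswith("person|") or low.startswith("person_"):
--         return "person"
--     if low.startswith("claim|") or low.startswith("claim_"):
--         return "claim"
--     if low.startswith("policy|") or low.startswith("policy_"):
--         return "policy"
--     if low.startswith("bank") or "bank_" in low[:16]:
--         return "bank"
--     if low.startswith("address|") or low.startswith("address_"):
--         return "address"
--     if low.startswith("business|") or low.startswith("business_"):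
--         return "business"
--     return ""
--
-- def infer_active_referents(
--     anchors: list[str],
--     graph_focus_node_id: str | None,
-- ) -> dict[str, str | None]:
--     """Deterministic primary entities for pronoun / follow-up resolution."""
--     primary_person: str | None = None
--     primary_claim: str | None = None
--     primary_policy: str | None = None
--     primary_bank: str | None = None
--
--     ordered = list(dict.fromkeys(a for a in anchors if a))
--     for a in ordered:
--         kind = _node_type_prefix(a)
--         if kind == "person" and not primary_person:
--             primary_person = a
--         elif kind == "claim" and not primary_claim:
--             primary_claim = a
--         elif kind == "policy" and not primary_policy:
--             primary_policy = a
--         elif kind == "bank" and not primary_bank: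
--             primary_bank = a
--
--     focus = (graph_focus_node_id or "").strip() or None
--     if focus:
--         fk = _node_type_prefix(focus)
--         if fk == "person":
--             primary_person = primary_person or focus
--         elif fk == "claim":
--             primary_claim = primary_claim or focus
--         elif fk == "policy":
--             primary_policy = primary_policy or focus
--         elif fk == "bank":
--             primary_bank = primary_bank or focus
--
--     return {
--         "primary_person": primary_person,
--         "primary_claim": primary_claim,
--         "primary_policy": primary_policy,
--         "primary_bank": primary_bank,
--         "graph_focus": focus,
--     }
-- ===== SOURCE B (Python) =====
-- def _node_type_prefix(node_id: str) -> str: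
--     s = (node_id or "").strip()
--     if not s:
--         return ""
--     low = s.lower()
--     if low.startswith("person|") or low.startswith("person_"):
--         return "person"
--     if low.startswith("claim|") or low.startswith("claim_"):
--         return "claim"
--     if low.startswith("policy|") or low.startswith("policy_"):
--         return "policy"
--     if low.startswith("bank") or "bank_" in low[:16]:
--         return "bank"
--     if low.startswith("address|") or low.startswith("address_"):
--         return "address"
--     if low.startswith("business|") or low.startswith("business_"):
--         return "business"
--     return ""
--
-- def infer_active_referents(anchors, graph_focus_node_id):
--     # One filtering/dedup pass, then four independent first-match scans;
--     # the focus fallback is a keyed dict update instead of an if/elif chain.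
--     seen = set()
--     ordered = []
--     for a in anchors:
--         if a and a not in seen:
--             seen.add(a)
--             ordered.append(a)
--
--     primary_person = next((a for a in ordered if _node_type_prefix(a) == "person"), None)
--     primary_claim = next((a for a in ordered if _node_type_prefix(a) == "claim"), None)
--     primary_policy = next((a for a in ordered if _node_type_prefix(a) == "policy"), None)
--     primary_bank = next((a for a in ordered if _node_type_prefix(a) == "bank"), None)
--
--     focus = (graph_focus_node_id or "").strip() or None
--     result = {
--         "primary_person": primary_person,
--         "primary_claim": primary_claim,
--         "primary_policy": primary_policy,
--         "primary_bank": primary_bank,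
--         "graph_focus": focus,
--     }
--     if focus:
--         key = "primary_" + _node_type_prefix(focus)
--         if key in result:
--             result[key] = result[key] or focus
--     return result
-- ===== Notes on version B (the rewrite author's own statement) =====
-- stated objective: simpler
-- what changed: Replaces the single four-branch classifying loop with one combined filter+dedup pass followed by four independent first-match scans, and replaces the if/elif focus-fallback chain with a single keyed dict update.
import Mathlib
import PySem

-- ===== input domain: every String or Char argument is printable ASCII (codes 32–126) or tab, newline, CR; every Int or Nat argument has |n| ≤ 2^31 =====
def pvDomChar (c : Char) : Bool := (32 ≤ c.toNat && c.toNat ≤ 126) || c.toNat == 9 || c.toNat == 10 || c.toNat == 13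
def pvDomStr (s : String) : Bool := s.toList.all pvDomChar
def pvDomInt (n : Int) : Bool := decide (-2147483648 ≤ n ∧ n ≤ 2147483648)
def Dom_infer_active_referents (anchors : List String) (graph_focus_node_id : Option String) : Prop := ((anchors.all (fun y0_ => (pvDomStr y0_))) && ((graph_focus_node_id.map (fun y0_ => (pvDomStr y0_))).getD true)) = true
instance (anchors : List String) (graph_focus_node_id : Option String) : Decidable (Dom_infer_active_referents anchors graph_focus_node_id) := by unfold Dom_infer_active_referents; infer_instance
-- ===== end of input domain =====

-- B differs from A by one combined filter+dedup pass plus four independent first-match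
-- scans and a keyed update for the focus fallback (objective: simpler decomposition).

-- ===== PORT A =====
-- shared module helper _node_type_prefix (Source B carries the identical helper)
def nodeTypePrefix (node_id : String) : String :=
  let s := PySem.Str.strip node_id          -- (node_id or "").strip(): 'or ""' is the identity on str
  if s == "" then ""
  else
    let low := PySem.Str.lower s
    if PySem.Str.startswith low "person|" || PySem.Str.startswith low "person_" then "person"
    else if PySem.Str.startswith low "claim|" || PySem.Str.startswith low "claim_" then "claim"
    else if PySem.Str.startswith low "policy|" || PySem.Str.startswith low "policy_" then "policy"
    else if PySem.Str.startswith low "bank" || PySem.Str.isIn "bank_" (PySem.Str.slice low none (some 16)) then "bank"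
    else if PySem.Str.startswith low "address|" || PySem.Str.startswith low "address_" then "address"
    else if PySem.Str.startswith low "business|" || PySem.Str.startswith low "business_" then "business"
    else ""

-- Python truthiness of an Optional[str]: None and "" are falsy
def optFalsy (o : Option String) : Bool := (o.getD "" == "")

def inferStepA (st : Option String × Option String × Option String × Option String)
    (a : String) : Option String × Option String × Option String × Option String :=
  let kind := nodeTypePrefix a
  if kind == "person" && optFalsy st.1 then (some a, st.2.1, st.2.2.1, st.2.2.2)
  else if kind == "claim" && optFalsy st.2.1 then (st.1, some a, st.2.2.1, st.2.2.2)
  else if kind == "policy" && optFalsy st.2.2.1 then (st.1, st.2.1, some a, st.2.2.2)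
  else if kind == "bank" && optFalsy st.2.2.2 then (st.1, st.2.1, st.2.2.1, some a)
  else st

def infer_active_referents (anchors : List String) (graph_focus_node_id : Option String) : List (String × Option String) :=
  let ordered := PySem.List.dedup (anchors.filter (fun a => a != ""))
  let st := ordered.foldl inferStepA (none, none, none, none)
  let focusS := PySem.Str.strip (graph_focus_node_id.getD "")
  let focus : Option String := if focusS == "" then none else some focusS
  let st2 :=
    match focus with
    | none => st
    | some f =>
      let fk := nodeTypePrefix f
      if fk == "person" then ((if optFalsy st.1 then some f else st.1), st.2.1, st.2.2.1, st.2.2.2)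
      else if fk == "claim" then (st.1, (if optFalsy st.2.1 then some f else st.2.1), st.2.2.1, st.2.2.2)
      else if fk == "policy" then (st.1, st.2.1, (if optFalsy st.2.2.1 then some f else st.2.2.1), st.2.2.2)
      else if fk == "bank" then (st.1, st.2.1, st.2.2.1, (if optFalsy st.2.2.2 then some f else st.2.2.2))
      else st
  [("primary_person", st2.1), ("primary_claim", st2.2.1),
   ("primary_policy", st2.2.2.1), ("primary_bank", st2.2.2.2), ("graph_focus", focus)]

-- ===== PORT B =====
def infer_active_referents_alt (anchors : List String) (graph_focus_node_id : Option String) : List (String × Option String) :=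
  -- one pass building seen (a set) and ordered together
  let acc := anchors.foldl
    (fun (acc : PySem.Set String × List String) a =>
      if a != "" && !(PySem.Set.contains acc.1 a) then (PySem.Set.add acc.1 a, acc.2 ++ [a]) else acc)
    (PySem.Set.empty, [])
  let ordered := acc.2
  -- four independent first-match scans (next(...) over a generator)
  let primary_person := ordered.find? (fun a => nodeTypePrefix a == "person")
  let primary_claim  := ordered.find? (fun a => nodeTypePrefix a == "claim")
  let primary_policy := ordered.find? (fun a => nodeTypePrefix a == "policy")
  let primary_bank   := ordered.find? (fun a => nodeTypePrefix a == "bank")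
  let focusS := PySem.Str.strip (graph_focus_node_id.getD "")
  let focus : Option String := if focusS == "" then none else some focusS
  let result : PySem.Dict String (Option String) := PySem.Dict.ofList
    [("primary_person", primary_person), ("primary_claim", primary_claim),
     ("primary_policy", primary_policy), ("primary_bank", primary_bank), ("graph_focus", focus)]
  let result2 :=
    match focus with
    | none => result
    | some f =>
      let key := "primary_" ++ nodeTypePrefix f
      if PySem.Dict.contains result key then
        PySem.Dict.insert result key
          (let v := PySem.Dict.getD result key none; if optFalsy v then some f else v)  -- result[key] or focus
      else result
  result2.items

-- ===== PRECONDITION & SPEC =====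
def Spec_infer_active_referents (anchors : List String) (graph_focus_node_id : Option String) (out : List (String × Option String)) : Prop := out = infer_active_referents_alt anchors graph_focus_node_id
instance (anchors : List String) (graph_focus_node_id : Option String) (out : List (String × Option String)) : Decidable (Spec_infer_active_referents anchors graph_focus_node_id out) := by unfold Spec_infer_active_referents; infer_instance

-- ===== CLAIM (what is proved, stated in full; the proofs are below) =====
def Claim_equal_infer_active_referents : Prop := ∀ (anchors : List String) (graph_focus_node_id : Option String), Dom_infer_active_referents anchors graph_focus_node_id → Spec_infer_active_referents anchors graph_focus_node_id (infer_active_referents anchors graph_focus_node_id)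

-- ===== LEMMAS AND PROOFS =====

theorem dedup_gen (l : List String) : ∀ (x : List String),
    (l.foldl
      (fun (acc : PySem.Set String × List String) a =>
        if a != "" && !(PySem.Set.contains acc.1 a) then (PySem.Set.add acc.1 a, acc.2 ++ [a]) else acc)
      (x, x))
    = ((l.filter (fun a => a != "")).foldl PySem.Set.add x,
       (l.filter (fun a => a != "")).foldl PySem.Set.add x) := by
  induction l with
  | nil => intro x; rfl
  | cons a l ih =>
    intro x
    rw [List.foldl_cons, List.filter_cons]
    by_cases ha : a = ""
    · rw [if_neg (by simp [ha] : ¬(a != "" && !(PySem.Set.contains x a)) = true),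
          if_neg (by simp [ha] : ¬(a != "") = true)]
      exact ih x
    · rw [if_pos (by simp [ha] : (a != "") = true)]
      by_cases hc : a ∈ x
      · rw [if_neg (by simp [hc] : ¬(a != "" && !(PySem.Set.contains x a)) = true)]
        have hb : PySem.Set.add x a = x := by simp [PySem.Set.add, hc]
        rw [List.foldl_cons, hb]
        exact ih x
      · rw [if_pos (by simp [ha, hc] : (a != "" && !(PySem.Set.contains x a)) = true)]
        have hb : PySem.Set.add x a = x ++ [a] := by simp [PySem.Set.add, hc]
        rw [List.foldl_cons, hb]
        exact ih (x ++ [a])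

theorem infer_dedup_eq (anchors : List String) :
    (anchors.foldl
      (fun (acc : PySem.Set String × List String) a =>
        if a != "" && !(PySem.Set.contains acc.1 a) then (PySem.Set.add acc.1 a, acc.2 ++ [a]) else acc)
      (PySem.Set.empty, [])).2
    = PySem.List.dedup (anchors.filter (fun a => a != "")) := by
  rw [show (PySem.Set.empty : PySem.Set String) = ([] : List String) from rfl, dedup_gen]
  rw [PySem.List.dedup_eq_ofList, PySem.Set.ofList_eq_foldl]

-- pick: what A's loop leaves in one component (helper lemmas below it)
def pick (s : Option String) (k : String) (l : List String) : Option String :=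
  if optFalsy s then
    match l.find? (fun a => nodeTypePrefix a == k) with
    | some a => some a
    | none => s
  else s

theorem pick_some {a : String} (ha : a ≠ "") (k : String) (l : List String) :
    pick (some a) k l = some a := by
  simp [pick, optFalsy, ha]

theorem pick_cons {a k : String} (h : nodeTypePrefix a = k) (s : Option String) (l : List String) :
    pick s k (a :: l) = if optFalsy s then some a else s := by
  simp [pick, h]

theorem pick_cons_ne {a k : String} (h : nodeTypePrefix a ≠ k) (s : Option String) (l : List String) :
    pick s k (a :: l) = pick s k l := by
  simp [pick, h]

-- the branch guard of A's loop being false for kind k means: kind ≠ k, or the slot is already truthy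
theorem pick_cons_else {a k : String} {s : Option String}
    (h : ¬((nodeTypePrefix a == k) && optFalsy s) = true) (l : List String) :
    pick s k l = pick s k (a :: l) := by
  by_cases hk : nodeTypePrefix a = k
  · have hf : optFalsy s = false := by
      cases hof : optFalsy s
      · rfl
      · exact absurd (by simp [hk, hof]) h
    simp [pick, hf]
  · rw [pick_cons_ne hk]

theorem pick_none (k : String) (l : List String) :
    pick none k l = l.find? (fun a => nodeTypePrefix a == k) := by
  unfold pick
  cases h : l.find? (fun a => nodeTypePrefix a == k)
  · simp [optFalsy]
  · simp [optFalsy]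

theorem prefix_cases (s : String) :
    nodeTypePrefix s = "person" ∨ nodeTypePrefix s = "claim" ∨ nodeTypePrefix s = "policy" ∨
    nodeTypePrefix s = "bank" ∨ nodeTypePrefix s = "address" ∨ nodeTypePrefix s = "business" ∨
    nodeTypePrefix s = "" := by
  unfold nodeTypePrefix
  dsimp only
  split_ifs <;> simp

theorem loopA_eq (l : List String) (hne : ∀ a ∈ l, a ≠ "")
    (pp pc ppo pb : Option String) :
    l.foldl inferStepA (pp, pc, ppo, pb)
    = (pick pp "person" l, pick pc "claim" l, pick ppo "policy" l, pick pb "bank" l) := by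
  induction l generalizing pp pc ppo pb with
  | nil => simp [pick]
  | cons a l ih =>
    have hane : a ≠ "" := hne a (List.mem_cons_self)
    have hne' : ∀ b ∈ l, b ≠ "" := fun b hb => hne b (List.mem_cons_of_mem _ hb)
    simp only [List.foldl_cons, inferStepA]
    split_ifs with h1 h2 h3 h4
    · obtain ⟨hk, hf⟩ := Bool.and_eq_true_iff.mp h1
      have hk' : nodeTypePrefix a = "person" := by simpa using hk
      rw [ih hne', pick_cons hk', if_pos hf, pick_cons_ne (by rw [hk']; decide : nodeTypePrefix a ≠ "claim"), pick_cons_ne (by rw [hk']; decide : nodeTypePrefix a ≠ "policy"), pick_cons_ne (by rw [hk']; decide : nodeTypePrefix a ≠ "bank"), pick_some hane]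
    · obtain ⟨hk, hf⟩ := Bool.and_eq_true_iff.mp h2
      have hk' : nodeTypePrefix a = "claim" := by simpa using hk
      rw [ih hne', pick_cons hk', if_pos hf, pick_cons_ne (by rw [hk']; decide : nodeTypePrefix a ≠ "person"), pick_cons_ne (by rw [hk']; decide : nodeTypePrefix a ≠ "policy"), pick_cons_ne (by rw [hk']; decide : nodeTypePrefix a ≠ "bank"), pick_some hane]
    · obtain ⟨hk, hf⟩ := Bool.and_eq_true_iff.mp h3
      have hk' : nodeTypePrefix a = "policy" := by simpa using hk
      rw [ih hne', pick_cons hk', if_pos hf, pick_cons_ne (by rw [hk']; decide : nodeTypePrefix a ≠ "person"), pick_cons_ne (by rw [hk']; decide : nodeTypePrefix a ≠ "claim"), pick_cons_ne (by rw [hk']; decide : nodeTypePrefix a ≠ "bank"), pick_some hane]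
    · obtain ⟨hk, hf⟩ := Bool.and_eq_true_iff.mp h4
      have hk' : nodeTypePrefix a = "bank" := by simpa using hk
      rw [ih hne', pick_cons hk', if_pos hf, pick_cons_ne (by rw [hk']; decide : nodeTypePrefix a ≠ "person"), pick_cons_ne (by rw [hk']; decide : nodeTypePrefix a ≠ "claim"), pick_cons_ne (by rw [hk']; decide : nodeTypePrefix a ≠ "policy"), pick_some hane]
    · rw [ih hne', pick_cons_else h1 l, pick_cons_else h2 l, pick_cons_else h3 l,
        pick_cons_else h4 l]

-- ===== VERDICT (by name: the statement is the Claim_ definition above) =====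
theorem infer_active_referents_spec : Claim_equal_infer_active_referents := by
  intro anchors g _
  unfold Spec_infer_active_referents infer_active_referents infer_active_referents_alt
  dsimp only
  rw [infer_dedup_eq]
  have hne : ∀ a ∈ PySem.List.dedup (anchors.filter (fun a => a != "")), a ≠ "" := by
    intro a ha
    have := (PySem.List.mem_dedup _ _).mp ha
    have := List.mem_filter.mp this
    simpa using this.2
  rw [loopA_eq _ hne, pick_none, pick_none, pick_none, pick_none]
  set l := PySem.List.dedup (anchors.filter (fun a => a != "")) with hl
  set pp := l.find? (fun a => nodeTypePrefix a == "person")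
  set pc := l.find? (fun a => nodeTypePrefix a == "claim")
  set ppo := l.find? (fun a => nodeTypePrefix a == "policy")
  set pb := l.find? (fun a => nodeTypePrefix a == "bank")
  cases hfoc : (PySem.Str.strip (g.getD "") == "") with
  | true =>
    rfl
  | false =>
    simp only [Bool.false_eq_true, if_false]
    rcases prefix_cases (PySem.Str.strip (g.getD "")) with h | h | h | h | h | h | h <;>
      simp [h, PySem.Dict.contains, PySem.Dict.insert, PySem.Dict.getD, PySem.Dict.get?,
        PySem.Dict.ofList, PySem.Dict.empty, PySem.Dict.update, List.find?]
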